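-- pv_equiv track=rewrite | github.com/jifan-chen/multi_reasoning | rule_based/pre_process.py | entity_extraction_
-- ===== SOURCE A (Python) =====
-- def entity_extraction_(words, tags):
--     in_entity = False
--     entities = []
--     phrase = []
--     for w, t in zip(words, tags):
--         if t != 'O':
--             phrase.append(w)
--             in_entity = True
--         elif t == 'O' and in_entity:
--             in_entity = False
--             entities.append(" ".join(phrase).lower())
--             phrase = []
--     return entities
-- ===== SOURCE B (Python) =====
-- def entity_extraction_(words, tags):
--     # Group the zipped (word, tag) pairs into maximal runs keyed by (tag == 'O'),
--     # then emit every non-'O' run except a final one (a trailing unterminated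
--     # run is never emitted), joined with spaces and lowercased.
--     groups = []
--     for w, t in zip(words, tags):
--         k = (t == 'O')
--         if groups and groups[-1][0] == k:
--             groups[-1][1].append(w)
--         else:
--             groups.append((k, [w]))
--     return [" ".join(g).lower() for k, g in groups[:-1] if not k]
-- ===== Notes on version B (the rewrite author's own statement) =====
-- stated objective: idiomatic
-- what changed: Replaces A's stateful in_entity/phrase flag scan by a group-then-emit decomposition: the zipped pairs are grouped back-to-front into maximal runs keyed by (tag == 'O'), and every non-'O' run except a trailing one is joined and lowercased.
import Mathlib
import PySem

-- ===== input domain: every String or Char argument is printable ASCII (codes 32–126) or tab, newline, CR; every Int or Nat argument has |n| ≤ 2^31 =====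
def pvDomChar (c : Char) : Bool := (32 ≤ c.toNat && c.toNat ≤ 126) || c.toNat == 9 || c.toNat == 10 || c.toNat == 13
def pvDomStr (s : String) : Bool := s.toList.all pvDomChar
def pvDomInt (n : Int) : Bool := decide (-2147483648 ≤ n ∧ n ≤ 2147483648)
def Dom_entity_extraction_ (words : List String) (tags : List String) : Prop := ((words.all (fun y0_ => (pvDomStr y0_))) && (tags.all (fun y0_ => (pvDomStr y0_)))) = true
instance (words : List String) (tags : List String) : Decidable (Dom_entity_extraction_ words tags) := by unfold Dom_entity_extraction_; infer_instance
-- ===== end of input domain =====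

-- B groups the zipped pairs into maximal runs keyed by (tag == 'O') built back-to-front,
-- then emits every non-'O' run except a final one (idiomatic objective; same values as A's stateful scan).

-- ===== PORT A =====
-- loop body of A's for-loop; state = (in_entity, entities, phrase)
def aStep (s : Bool × List String × List String) (wt : String × String) :
    Bool × List String × List String :=
  if wt.2 ≠ "O" then (true, s.2.1, s.2.2 ++ [wt.1])
  else if wt.2 = "O" ∧ s.1 = true then
    (false, s.2.1 ++ [PySem.Str.lower (PySem.Str.join " " s.2.2)], [])
  else s

def entity_extraction_ (words : List String) (tags : List String) : List String :=
  ((words.zip tags).foldl aStep (false, [], [])).2.1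

-- ===== PORT B =====
-- loop body of B's grouping loop: append one word to the group list, merging with the
-- last group when its key (tag == 'O') agrees
def bGroupStep (gs : List (Bool × List String)) (wt : String × String) :
    List (Bool × List String) :=
  match gs.getLast? with
  | some (k', g) =>
    if k' == (wt.2 == "O") then gs.dropLast ++ [(k', g ++ [wt.1])]
    else gs ++ [((wt.2 == "O"), [wt.1])]
  | none => gs ++ [((wt.2 == "O"), [wt.1])]

def entity_extraction__alt (words : List String) (tags : List String) : List String :=
  let groups := (words.zip tags).foldl bGroupStep []
  (groups.dropLast.filter (fun g => !g.1)).map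
    (fun g => PySem.Str.lower (PySem.Str.join " " g.2))

-- ===== PRECONDITION & SPEC =====
def Spec_entity_extraction_ (words : List String) (tags : List String) (out : List String) : Prop := out = entity_extraction__alt words tags
instance (words : List String) (tags : List String) (out : List String) : Decidable (Spec_entity_extraction_ words tags out) := by unfold Spec_entity_extraction_; infer_instance

-- ===== CLAIM (what is proved, stated in full; the proofs are below) =====
def Claim_equal_entity_extraction_ : Prop := ∀ (words : List String) (tags : List String), Dom_entity_extraction_ words tags → Spec_entity_extraction_ words tags (entity_extraction_ words tags)

-- ===== LEMMAS AND PROOFS =====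

-- join-and-lower of a phrase
def jl (ph : List String) : String := PySem.Str.lower (PySem.Str.join " " ph)

-- recursive characterisation of A's scan with pending phrase ph
def ACore : List String → List (String × String) → List String
  | _, [] => []
  | ph, (w, t) :: rest =>
    if t ≠ "O" then ACore (ph ++ [w]) rest
    else if ph.isEmpty then ACore [] rest
    else jl ph :: ACore [] rest

-- word-level groups (key, words of the run), built back-to-front like bGroupStep
def wg : List (String × String) → List (Bool × List String)
  | [] => []
  | (w, t) :: rest =>
    match wg rest with
    | (k', g) :: r => if k' == (t == "O") then ((t == "O"), w :: g) :: r
                      else ((t == "O"), [w]) :: (k', g) :: r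
    | [] => [((t == "O"), [w])]

-- B's emission on word-level groups
def Bemit (gs : List (Bool × List String)) : List String :=
  (gs.dropLast.filter (fun g => !g.1)).map (fun g => jl g.2)

-- a pending phrase prepended as a (merged) non-'O' front group
def prep (ph : List String) (gs : List (Bool × List String)) : List (Bool × List String) :=
  if ph.isEmpty then gs
  else match gs with
    | (false, g) :: r => (false, ph ++ g) :: r
    | _ => (false, ph) :: gs

lemma Bemit_cons (a : Bool × List String) (gs : List (Bool × List String)) (h : gs ≠ []) :
    Bemit (a :: gs) = if a.1 = true then Bemit gs else jl a.2 :: Bemit gs := by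
  cases gs with
  | nil => exact absurd rfl h
  | cons b t =>
    simp only [Bemit, List.dropLast_cons₂, List.filter_cons]
    cases ha : a.1 <;> simp

lemma Bemit_true (g g' : List String) (r : List (Bool × List String)) :
    Bemit ((true, g) :: r) = Bemit ((true, g') :: r) := by
  cases r with
  | nil => rfl
  | cons b t =>
    rw [Bemit_cons (true, g) (b :: t) (by simp), Bemit_cons (true, g') (b :: t) (by simp)]
    simp

lemma ACore_eq (l : List (String × String)) : ∀ ph : List String,
    ACore ph l = Bemit (prep ph (wg l)) := by
  induction l with
  | nil =>
    intro ph
    by_cases h : ph.isEmpty <;> simp [ACore, wg, prep, h, Bemit]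
  | cons x rest ih =>
    intro ph
    obtain ⟨w, t⟩ := x
    by_cases ht : t = "O"
    · subst ht
      have LHS : ACore ph ((w, "O") :: rest) =
          if ph.isEmpty then ACore [] rest else jl ph :: ACore [] rest := by
        simp [ACore]
      have hX : ACore [] rest = Bemit (wg rest) := by
        rw [ih []]; simp [prep]
      rcases hw : wg rest with _ | ⟨⟨k', g⟩, r⟩
      · have hwl : wg ((w, "O") :: rest) = [(true, [w])] := by simp [wg, hw]
        by_cases h : ph.isEmpty
        · simp [LHS, h, hX, hw, hwl, prep, Bemit]
        · rw [LHS, if_neg h, hX, hw, hwl]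
          have hp : prep ph [(true, [w])] = (false, ph) :: [(true, [w])] := by
            simp [prep, h]
          rw [hp, Bemit_cons (false, ph) [(true, [w])] (by simp)]
          simp [Bemit]
      · cases k'
        · -- rest starts with a non-'O' run
          have hwl : wg ((w, "O") :: rest) = (true, [w]) :: (false, g) :: r := by
            simp [wg, hw]
          by_cases h : ph.isEmpty
          · have hp : prep ph ((true, [w]) :: (false, g) :: r)
                = (true, [w]) :: (false, g) :: r := by simp [prep, h]
            rw [LHS, if_pos h, hX, hw, hwl, hp,
              Bemit_cons (true, [w]) ((false, g) :: r) (by simp)]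
            simp
          · rw [LHS, if_neg h, hX, hw, hwl]
            have : prep ph ((true, [w]) :: (false, g) :: r)
                = (false, ph) :: (true, [w]) :: (false, g) :: r := by
              simp [prep, h]
            rw [this, Bemit_cons (false, ph) ((true, [w]) :: (false, g) :: r) (by simp),
              Bemit_cons (true, [w]) ((false, g) :: r) (by simp)]
            simp
        · -- rest starts with an 'O' run: merge
          have hwl : wg ((w, "O") :: rest) = (true, w :: g) :: r := by
            simp [wg, hw]
          have hmerge : Bemit ((true, w :: g) :: r) = Bemit ((true, g) :: r) :=
            Bemit_true _ _ _
          by_cases h : ph.isEmpty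
          · have hp : prep ph ((true, w :: g) :: r) = (true, w :: g) :: r := by
              simp [prep, h]
            rw [LHS, if_pos h, hX, hw, hwl, hp, hmerge]
          · rw [LHS, if_neg h, hX, hw, hwl]
            have : prep ph ((true, w :: g) :: r)
                = (false, ph) :: (true, w :: g) :: r := by
              simp [prep, h]
            rw [this, Bemit_cons (false, ph) ((true, w :: g) :: r) (by simp), hmerge]
            simp
    · -- t ≠ "O": both sides reduce to the same prepped group list
      have LHS : ACore ph ((w, t) :: rest) = ACore (ph ++ [w]) rest := by
        simp [ACore, ht]
      rw [LHS, ih (ph ++ [w])]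
      congr 1
      rcases hw : wg rest with _ | ⟨⟨k', g⟩, r⟩
      · have hwl : wg ((w, t) :: rest) = [(false, [w])] := by simp [wg, hw, ht]
        by_cases h : ph.isEmpty
        · have h' : ph = [] := by simpa using h
          subst h'; simp [hwl, prep]
        · simp [hwl, prep, h]
      · cases k'
        · have hwl : wg ((w, t) :: rest) = (false, w :: g) :: r := by
            simp [wg, hw, ht]
          by_cases h : ph.isEmpty
          · have h' : ph = [] := by simpa using h
            subst h'; simp [hwl, prep]
          · simp [hwl, prep, h, List.append_assoc]
        · have hwl : wg ((w, t) :: rest) = (false, [w]) :: (true, g) :: r := by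
            simp [wg, hw, ht]
          by_cases h : ph.isEmpty
          · have h' : ph = [] := by simpa using h
            subst h'; simp [hwl, prep]
          · simp [hwl, prep, h]

lemma aStep_ne (s : Bool × List String × List String) (w t : String) (h : t ≠ "O") :
    aStep s (w, t) = (true, s.2.1, s.2.2 ++ [w]) := by simp [aStep, h]

lemma aStep_O_true (ents ph : List String) (w : String) :
    aStep (true, ents, ph) (w, "O") = (false, ents ++ [jl ph], []) := by
  simp [aStep, jl]

lemma aStep_O_false (ents ph : List String) (w : String) :
    aStep (false, ents, ph) (w, "O") = (false, ents, ph) := by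
  simp [aStep]

lemma foldA (l : List (String × String)) : ∀ (ents ph : List String),
    (l.foldl aStep (!ph.isEmpty, ents, ph)).2.1 = ents ++ ACore ph l := by
  induction l with
  | nil => intro ents ph; simp [ACore]
  | cons x rest ih =>
    intro ents ph
    obtain ⟨w, t⟩ := x
    by_cases ht : t = "O"
    · subst ht
      by_cases h : ph.isEmpty
      · have h' : ph = [] := by simpa using h
        subst h'
        rw [List.foldl_cons]
        simp only [List.isEmpty_nil, Bool.not_true]
        rw [aStep_O_false]
        have := ih ents []
        simp only [List.isEmpty_nil, Bool.not_true] at this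
        rw [this]
        simp [ACore]
      · rw [List.foldl_cons]
        have hb : (!ph.isEmpty) = true := by simp [h]
        rw [hb, aStep_O_true]
        have := ih (ents ++ [jl ph]) []
        simp only [List.isEmpty_nil, Bool.not_true] at this
        rw [this]
        simp [ACore, h]
    · rw [List.foldl_cons, aStep_ne _ _ _ ht]
      have hb : (true : Bool) = !((ph ++ [w]).isEmpty) := by simp
      rw [hb, ih ents (ph ++ [w])]
      simp [ACore, ht]

-- gluing a finished group prefix onto the groups of the remaining suffix
def glue (gs hs : List (Bool × List String)) : List (Bool × List String) :=
  match gs.getLast?, hs with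
  | some (k', g), (k, h) :: t => if k' == k then gs.dropLast ++ (k', g ++ h) :: t else gs ++ hs
  | _, _ => gs ++ hs

lemma glue_nil_right (gs : List (Bool × List String)) : glue gs [] = gs := by
  rcases h : gs.getLast? with _ | ⟨k, g⟩ <;> simp [glue, h]

lemma glue_nil_left (hs : List (Bool × List String)) : glue [] hs = hs := by
  cases hs <;> simp [glue]

lemma foldl_glue (l : List (String × String)) :
    ∀ gs, l.foldl bGroupStep gs = glue gs (wg l) := by
  induction l with
  | nil => intro gs; simp [wg, glue_nil_right]
  | cons x rest ih =>
    intro gs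
    obtain ⟨w, t⟩ := x
    rw [List.foldl_cons, ih]
    rcases hg : gs.getLast? with _ | ⟨k0, g0⟩
    · have hgs : gs = [] := List.getLast?_eq_none_iff.mp hg
      subst hgs
      rw [glue_nil_left]
      rcases hw : wg rest with _ | ⟨⟨k1, h⟩, t1⟩
      · simp [bGroupStep, glue, wg, hw]
      · by_cases hk : k1 = (t == "O")
        · simp [bGroupStep, glue, wg, hw, hk]
        · simp [bGroupStep, glue, wg, hw, hk, Ne.symm hk]
    · by_cases hk0 : k0 = (t == "O")
    -- the appended word merges into gs's last group iff the keys agree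
      · have hstep : bGroupStep gs (w, t) = gs.dropLast ++ [(k0, g0 ++ [w])] := by
          simp [bGroupStep, hg, hk0]
        rcases hw : wg rest with _ | ⟨⟨k1, h⟩, t1⟩
        · rw [hstep]
          simp [glue, wg, hw, hg, hk0]
        · by_cases hk1 : k1 = (t == "O")
          · rw [hstep]
            simp [glue, wg, hw, hg, hk0, hk1, List.append_assoc]
          · rw [hstep]
            simp [glue, wg, hw, hg, hk0, hk1, Ne.symm hk1, List.append_assoc]
      · have hstep : bGroupStep gs (w, t) = gs ++ [((t == "O"), [w])] := by
          simp [bGroupStep, hg, hk0]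
        rcases hw : wg rest with _ | ⟨⟨k1, h⟩, t1⟩
        · rw [hstep]
          simp [glue, wg, hw, hg, hk0]
        · by_cases hk1 : k1 = (t == "O")
          · rw [hstep]
            simp [glue, wg, hw, hg, hk0, hk1, Ne.symm hk0, List.append_assoc]
          · rw [hstep]
            simp [glue, wg, hw, hg, hk0, hk1, Ne.symm hk0, Ne.symm hk1, List.append_assoc]

lemma alt_eq (words tags : List String) :
    entity_extraction__alt words tags = Bemit (wg (words.zip tags)) := by
  unfold entity_extraction__alt
  rw [foldl_glue _ [], glue_nil_left]
  simp [Bemit, jl]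

-- ===== VERDICT (by name: the statement is the Claim_ definition above) =====
theorem entity_extraction__spec : Claim_equal_entity_extraction_ := by
  intro words tags _
  unfold Spec_entity_extraction_
  rw [alt_eq]
  unfold entity_extraction_
  have h0 : (false, ([] : List String), ([] : List String))
      = ((!(([] : List String).isEmpty)), ([] : List String), ([] : List String)) := by simp
  rw [h0, foldA]
  rw [ACore_eq]
  simp [prep]
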